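-- pv_equiv track=rewrite | github.com/jaewoong2/Algo-python | 2021_summer_vacation/programmers_lv2.py | game_of_n
-- ===== SOURCE A (Python) =====
-- def game_of_n(n: int, t: int, m: int, p: int):
--     # n: 진수, t: 구해야하는 갯수, m: 참가인원, p: 순서
--     num_dict = ['0', '1', '2', '3', '4', '5', '6', '7', '8', '9', 'A', 'B', 'C', 'D', 'E', 'F']
--     numbers = []
--     for num in range(1001):
--         numbers.append(num)
--
--     for i, number in enumerate(numbers):
--         temp = ''
--         while number >= n:
--             remainder = number % n
--             number = number // n
--             temp = num_dict[remainder] + temp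
--         temp = num_dict[number] + temp
--         numbers[i] = temp
--
--     str_numbers = ''.join(numbers)
--
--     result = ''
--     idx = p - 1
--     while len(result) < t:
--         result += str_numbers[idx]
--         idx += m
--
--
--     return ''.join(result)
-- ===== SOURCE B (Python) =====
-- def game_of_n(n, t, m, p):
--     # Streaming re-implementation: walk numbers 0..1000, convert each to base n,
--     # and pick the needed characters on the fly with a global position counter;
--     # never materialises the full concatenated string and stops early.
--     digits = '0123456789ABCDEF'
--     taken = []
--     target = p - 1          # next global character position to pick
--     pos = 0                 # global position of the first char of the current number
--     num = 0
--     while len(taken) < t and num <= 1000: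
--         rep = ''
--         x = num
--         while True:
--             rep = digits[x % n] + rep
--             x = x // n
--             if x == 0:
--                 break
--         end = pos + len(rep)
--         while len(taken) < t and pos <= target < end:
--             taken.append(rep[target - pos])
--             target += m
--         pos = end
--         num += 1
--     if len(taken) < t:
--         raise IndexError('string index out of range')
--     return ''.join(taken)
-- ===== Notes on version B (the rewrite author's own statement) =====
-- stated objective: alternative
-- what changed: B replaces A's build-the-whole-4000-char-string-then-index approach with a single streaming pass: it walks numbers 0..1000, converts each to base n on the fly, keeps a global position counter, and collects the needed characters as their positions stream by, stopping as soon as t characters are gathered.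
-- outside the precondition, e.g. on game_of_n(2, 3, 1, 0): A returns '001', B raises IndexError; on game_of_n(2, 2, -1, 2): A returns '10', B raises IndexError; on game_of_n(5, 4, -3, 30): A returns '3022', B raises IndexError
import Mathlib
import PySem

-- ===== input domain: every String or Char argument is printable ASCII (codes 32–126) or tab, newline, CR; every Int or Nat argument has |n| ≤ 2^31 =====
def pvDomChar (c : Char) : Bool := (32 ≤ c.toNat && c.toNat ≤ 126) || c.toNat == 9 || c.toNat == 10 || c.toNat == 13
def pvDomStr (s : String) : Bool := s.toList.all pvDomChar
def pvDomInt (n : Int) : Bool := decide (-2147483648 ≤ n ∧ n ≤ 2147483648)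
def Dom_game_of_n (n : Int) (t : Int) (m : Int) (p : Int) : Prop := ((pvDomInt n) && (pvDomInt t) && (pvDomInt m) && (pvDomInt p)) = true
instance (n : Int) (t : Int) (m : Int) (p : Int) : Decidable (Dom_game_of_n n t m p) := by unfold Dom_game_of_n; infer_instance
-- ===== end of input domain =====

-- B streams the base-n digits of 0..1000 with a global position counter and picks the
-- needed characters on the fly (stopping early), instead of materialising the whole
-- concatenated string and indexing it as A does.

-- ===== PORT A =====
-- num_dict[r] lookup (a 1-character string in Python; a Char here); B's Source B uses the
-- identical literal digit table, so the lookup helper is shared by both ports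
def pvDigit (r : Int) : Char :=
  (PySem.List.pyGet? ['0','1','2','3','4','5','6','7','8','9','A','B','C','D','E','F'] r).getD ' '

-- A's inner while-loop plus the final `temp = num_dict[number] + temp` line;
-- fuel 1001 covers every iteration count reached under Pre_ (number ≤ 1000, n ≥ 2)
def convA : Nat → Int → Int → List Char → List Char
  | 0, _, _, temp => temp
  | f + 1, n, number, temp =>
    if n ≤ number then
      convA f n (PySem.Int.floordiv number n) (pvDigit (PySem.Int.mod number n) :: temp)
    else pvDigit number :: temp

-- A's final while-loop: runs while len(result) < t adding one char per step (fuel t.toNat);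
-- Python raises IndexError exactly where pyGet? is none (outside Pre_), the port stops there
def pickA : Nat → List Char → Int → Int → List Char → List Char
  | 0, _, _, _, result => result
  | f + 1, s, idx, m, result =>
    match PySem.List.pyGet? s idx with
    | none => result
    | some c => pickA f s (idx + m) m (result ++ [c])

def game_of_n (n : Int) (t : Int) (m : Int) (p : Int) : String :=
  let numbers := PySem.List.pyRange 0 1001 1
  let str_numbers := (numbers.map (fun number => convA 1001 n number [])).flatten
  String.ofList (pickA t.toNat str_numbers (p - 1) m [])

-- ===== PORT B =====
-- Source B's do-while base conversion: digits[x % n] prepended, stop when x // n == 0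
def convB : Nat → Int → Int → List Char → List Char
  | 0, _, _, rep => rep
  | f + 1, n, x, rep =>
    let rep' := pvDigit (PySem.Int.mod x n) :: rep
    let x' := PySem.Int.floordiv x n
    if x' = 0 then rep' else convB f n x' rep'

-- Source B's inner while-loop: takes chars of the current rep while the next target falls in
-- it; each step appends one char under len(taken) < t, so fuel t.toNat suffices
def takeB : Nat → Int → List Char → Int → Int → Int → List Char → List Char × Int
  | 0, _, _, _, target, _, taken => (taken, target)
  | f + 1, t, rep, pos, target, m, taken =>
    if (taken.length : Int) < t ∧ pos ≤ target ∧ target < pos + (rep.length : Int) then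
      takeB f t rep pos (target + m) m (taken ++ [(PySem.List.pyGet? rep (target - pos)).getD ' '])
    else (taken, target)

-- Source B's outer while-loop over num = 0..1000 (fuel 1001); the trailing `raise IndexError`
-- of Source B fires only outside Pre_, where the port simply returns the chars gathered
def outerB : Nat → Int → Int → Int → Int → Int → Int → List Char → List Char
  | 0, _, _, _, _, _, _, taken => taken
  | f + 1, n, t, m, num, pos, target, taken =>
    if (taken.length : Int) < t ∧ num ≤ 1000 then
      let rep := convB 1001 n num []
      let r := takeB t.toNat t rep pos target m taken
      outerB f n t m (num + 1) (pos + (rep.length : Int)) r.2 r.1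
    else taken

def game_of_n_alt (n : Int) (t : Int) (m : Int) (p : Int) : String :=
  String.ofList (outerB 1001 n t m 0 0 (p - 1) [])

-- ===== PRECONDITION & SPEC =====
-- total length of the concatenation of the base-n strings of 0..1000
-- (the base-n digit count of k is Nat.log n k + 1)
def pvLen (n : Int) : Int := ((List.range 1001).map (fun k => (Nat.log n.toNat k : Int) + 1)).sum

-- Pre_ excludes: n outside 2..16, where A never returns normally (infinite loop for n ≤ 1,
-- ZeroDivisionError for n = 0, IndexError into num_dict for n > 16); and, for t > 0, index
-- sequences leaving [0, pvLen n) — past the end A raises IndexError, while for p ≤ 0 or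
-- m < 0 A's negative indices wrap around to the tail of the string (an accident of Python
-- indexing) where B's forward stream is exhausted and raises IndexError.
def Pre_game_of_n (n : Int) (t : Int) (m : Int) (p : Int) : Prop :=
  2 ≤ n ∧ n ≤ 16 ∧ (t ≤ 0 ∨ (1 ≤ p ∧ 0 ≤ m ∧ p - 1 + (t - 1) * m < pvLen n))
instance (n : Int) (t : Int) (m : Int) (p : Int) : Decidable (Pre_game_of_n n t m p) := by
  unfold Pre_game_of_n; infer_instance

def pvWitness_game_of_n : Int × Int × Int × Int := (10, 0, 1, 1)

def Spec_game_of_n (n : Int) (t : Int) (m : Int) (p : Int) (out : String) : Prop := out = game_of_n_alt n t m p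
instance (n : Int) (t : Int) (m : Int) (p : Int) (out : String) : Decidable (Spec_game_of_n n t m p out) := by unfold Spec_game_of_n; infer_instance

-- ===== CLAIM (what is proved, stated in full; the proofs are below) =====
def Claim_equal_game_of_n : Prop := ∀ (n : Int) (t : Int) (m : Int) (p : Int), Dom_game_of_n n t m p → Pre_game_of_n n t m p → Spec_game_of_n n t m p (game_of_n n t m p)

-- ===== LEMMAS AND PROOFS =====

-- the k-th block (base-n string of k), the full concatenation, its prefixes/suffixes,
-- and the character the k-th pick of the result reads
def pvBlk (n : Int) (k : Nat) : List Char := convA 1001 n (k : Int) []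
def pvCat (n : Int) : List Char := ((List.range 1001).map (pvBlk n)).flatten
def pvPre (n : Int) (j : Nat) : List Char := ((List.range j).map (pvBlk n)).flatten
def pvSuf (n : Int) (j : Nat) : List Char := ((List.range' j (1001 - j)).map (pvBlk n)).flatten
def pvPick (n p m : Int) (k : Nat) : Char :=
  (PySem.List.pyGet? (pvCat n) (p - 1 + (k : Int) * m)).getD ' '

-- A's bottom-up while-loop and B's do-while produce the same digit list
lemma conv_eq (f : Nat) : ∀ (n x : Int) (temp : List Char), 2 ≤ n → 0 ≤ x → x < (f : Int) →
    convA f n x temp = convB f n x temp := by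
  induction f with
  | zero => intro n x temp _ hx hf; simp at hf; omega
  | succ f ih =>
    intro n x temp h2 hx hf
    have hn : 0 < n := by omega
    have hq : PySem.Int.floordiv x n = x / n := PySem.Int.floordiv_eq_ediv_of_pos hn
    have hm : PySem.Int.mod x n = x % n := PySem.Int.mod_eq_emod_of_pos hn
    simp only [convA, convB]
    by_cases hge : n ≤ x
    · rw [if_pos hge]
      have hx0 : 0 < x := by omega
      have hqlt : x / n < x := Int.ediv_lt_of_lt_mul (by omega) (by nlinarith)
      have hqpos : 0 < x / n := by
        have := Int.le_ediv_iff_mul_le (a := 1) (b := x) hn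
        omega
      rw [if_neg (by omega : ¬ PySem.Int.floordiv x n = 0)]
      exact ih n (PySem.Int.floordiv x n) _ h2 (by omega) (by push_cast at hf ⊢; omega)
    · rw [if_neg hge]
      have hmx : PySem.Int.mod x n = x := by rw [hm, Int.emod_eq_of_lt hx (by omega)]
      have hq0 : PySem.Int.floordiv x n = 0 := by rw [hq, Int.ediv_eq_zero_of_lt hx (by omega)]
      rw [hmx, if_pos hq0]

-- the base-n string of x has Nat.log n x + 1 digits
lemma conv_len (f : Nat) : ∀ (n x : Int) (temp : List Char), 2 ≤ n → 0 ≤ x → x < (f : Int) →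
    (convA f n x temp).length = Nat.log n.toNat x.toNat + 1 + temp.length := by
  induction f with
  | zero => intro n x temp _ hx hf; simp at hf; omega
  | succ f ih =>
    intro n x temp h2 hx hf
    have hn : 0 < n := by omega
    have hq : PySem.Int.floordiv x n = x / n := PySem.Int.floordiv_eq_ediv_of_pos hn
    simp only [convA]
    by_cases hge : n ≤ x
    · rw [if_pos hge]
      have hx0 : 0 < x := by omega
      have hqlt : x / n < x := Int.ediv_lt_of_lt_mul (by omega) (by nlinarith)
      rw [ih n (PySem.Int.floordiv x n) _ h2 (by rw [hq]; exact Int.ediv_nonneg hx (by omega)) (by push_cast at hf ⊢; omega)]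
      have htn : (PySem.Int.floordiv x n).toNat = x.toNat / n.toNat := by
        rw [hq]
        rcases Int.eq_ofNat_of_zero_le hx with ⟨a, rfl⟩
        rcases Int.eq_ofNat_of_zero_le (by omega : (0:Int) ≤ n) with ⟨b, rfl⟩
        rfl
      rw [htn, Nat.log_div_base]
      have hpos : 0 < Nat.log n.toNat x.toNat :=
        Nat.log_pos (by omega) (by omega)
      simp only [List.length_cons]
      omega
    · rw [if_neg hge]
      have : Nat.log n.toNat x.toNat = 0 := Nat.log_eq_zero_iff.mpr (Or.inl (by omega))
      simp only [List.length_cons, this]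
      omega

-- the string A joins is pvCat
lemma cat_eq (n : Int) :
    ((PySem.List.pyRange 0 1001 1).map (fun number => convA 1001 n number [])).flatten = pvCat n := by
  rw [PySem.List.pyRange_one]
  simp only [List.map_map, Function.comp_def, zero_add]
  norm_num [pvCat, pvBlk]
  rfl

set_option maxRecDepth 4096 in
lemma cat_len (n : Int) (h2 : 2 ≤ n) : ((pvCat n).length : Int) = pvLen n := by
  simp only [pvCat, pvLen, List.length_flatten, List.map_map]
  rw [Nat.cast_list_sum, List.map_map]
  congr 1
  apply List.map_congr_left
  intro k hk
  simp only [Function.comp_def, pvBlk]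
  rw [conv_len 1001 n (k : Int) [] h2 (by positivity) (by simp at hk ⊢; omega)]
  simp

lemma pre_succ (n : Int) (j : Nat) : pvPre n (j + 1) = pvPre n j ++ pvBlk n j := by
  simp [pvPre, List.range_succ]

lemma suf_cons (n : Int) (j : Nat) (hj : j ≤ 1000) :
    pvSuf n j = pvBlk n j ++ pvSuf n (j + 1) := by
  simp only [pvSuf]
  rw [show 1001 - j = (1001 - (j + 1)) + 1 by omega, List.range'_succ]
  simp

lemma pre_suf (n : Int) (j : Nat) (hj : j ≤ 1001) :
    pvCat n = pvPre n j ++ pvSuf n j := by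
  simp only [pvCat, pvPre, pvSuf, List.range_eq_range']
  have h1 : List.range' j (1001 - j) = List.range' (0 + 1 * j) (1001 - j) := by norm_num
  rw [h1, ← List.flatten_append, ← List.map_append, List.range'_append]
  rw [show j + (1001 - j) = 1001 by omega]

lemma cat_split (n : Int) (j : Nat) (hj : j ≤ 1000) :
    pvCat n = pvPre n j ++ (pvBlk n j ++ pvSuf n (j + 1)) := by
  rw [pre_suf n j (by omega), suf_cons n j hj]

-- reading a global position that falls inside the middle block reads that block
lemma pyGet?_middle (pre rep rest : List Char) (i : Int)
    (h1 : (pre.length : Int) ≤ i) (h2 : i < (pre.length : Int) + rep.length) :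
    PySem.List.pyGet? (pre ++ (rep ++ rest)) i = PySem.List.pyGet? rep (i - pre.length) := by
  have h0 : 0 ≤ i := le_trans (by positivity) h1
  rw [PySem.List.pyGet?_of_nonneg _ h0, PySem.List.pyGet?_of_nonneg _ (by omega)]
  rw [List.getElem?_append_right (by omega : pre.length ≤ i.toNat)]
  rw [List.getElem?_append_left (by omega : i.toNat - pre.length < rep.length)]
  congr 1
  omega

-- A's picking loop returns the arithmetic-progression reads, provided all stay in range
lemma pickA_spec (f : Nat) : ∀ (s : List Char) (idx m : Int) (acc : List Char),
    (∀ k : Nat, k < f → 0 ≤ idx + (k : Int) * m ∧ idx + (k : Int) * m < (s.length : Int)) →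
    pickA f s idx m acc = acc ++ (List.range f).map (fun (k : Nat) => (PySem.List.pyGet? s (idx + (k : Int) * m)).getD ' ') := by
  induction f with
  | zero => intro s idx m acc _; simp [pickA]
  | succ f ih =>
    intro s idx m acc h
    have h0 := h 0 (by omega)
    simp only [Nat.cast_zero, zero_mul, add_zero] at h0
    have hg : PySem.List.pyGet? s idx = some s[idx.toNat] :=
      PySem.List.pyGet?_eq_some_getElem _ h0.1 h0.2
    simp only [pickA, hg]
    rw [ih s (idx + m) m _ (by
      intro k hk
      have := h (k + 1) (by omega)
      push_cast at this ⊢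
      constructor <;> nlinarith [this.1, this.2])]
    rw [List.range_succ_eq_map, List.map_cons, List.map_map]
    simp only [List.append_assoc, List.singleton_append, Nat.cast_zero, zero_mul, add_zero, hg,
      Option.getD_some, Function.comp_def]
    congr 1
    congr 1
    apply List.map_congr_left
    intro k _
    congr 1
    push_cast
    ring_nf

-- B's inner loop: it takes some d consecutive picks of the progression, all inside the
-- current block, and stops with the bookkeeping facts the outer induction needs
lemma takeB_spec (f : Nat) : ∀ (t : Int) (rep : List Char) (pos target m : Int) (taken : List Char),
    0 ≤ m → pos ≤ target →
    ∃ d : Nat,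
      takeB f t rep pos target m taken
        = (taken ++ (List.range d).map (fun (k : Nat) => (PySem.List.pyGet? rep (target + (k : Int) * m - pos)).getD ' '),
           target + (d : Int) * m)
      ∧ (∀ k : Nat, k < d → target + (k : Int) * m < pos + (rep.length : Int))
      ∧ ((taken.length : Int) + d ≥ t ∨ pos + (rep.length : Int) ≤ target + (d : Int) * m ∨ d = f)
      ∧ ((taken.length : Int) + d ≤ t ∨ d = 0) := by
  induction f with
  | zero =>
    intro t rep pos target m taken hm hpt
    exact ⟨0, by simp [takeB], by omega, by omega, by omega⟩
  | succ f ih =>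
    intro t rep pos target m taken hm hpt
    by_cases hc : (taken.length : Int) < t ∧ pos ≤ target ∧ target < pos + (rep.length : Int)
    · obtain ⟨d, heq, hbnd, hexit, hle⟩ :=
        ih t rep pos (target + m) m (taken ++ [(PySem.List.pyGet? rep (target - pos)).getD ' ']) hm (by omega)
      refine ⟨d + 1, ?_, ?_, ?_, ?_⟩
      · simp only [takeB, if_pos hc, heq]
        rw [Prod.mk.injEq]
        constructor
        · rw [List.range_succ_eq_map, List.map_cons, List.map_map]
          simp only [Nat.cast_zero, zero_mul, add_zero, List.append_assoc, List.singleton_append,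
            Function.comp_def]
          congr 2
          apply List.map_congr_left
          intro k _
          congr 2
          push_cast [Nat.succ_eq_add_one]
          ring
        · push_cast; ring
      · intro k hk
        rcases Nat.eq_zero_or_pos k with hk0 | hkp
        · subst hk0; simpa using hc.2.2
        · have := hbnd (k - 1) (by omega)
          have hcast : ((k - 1 : Nat) : Int) = (k : Int) - 1 := by omega
          rw [hcast] at this
          nlinarith [this]
      · simp only [List.length_append, List.length_cons, List.length_nil] at hexit
        rcases hexit with h | h | h
        · left; push_cast at h ⊢; omega
        · right; left; push_cast at h ⊢; nlinarith [h]
        · right; right; omega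
      · simp only [List.length_append, List.length_cons, List.length_nil] at hle
        rcases hle with h | h
        · left; push_cast at h ⊢; omega
        · left; push_cast; omega
    · refine ⟨0, by simp [takeB, if_neg hc], by omega, ?_, by omega⟩
      push_cast
      simp only [Nat.cast_zero, zero_mul, add_zero]
      omega

-- B's outer loop invariant: having taken the first c picks with the next target pending,
-- it finishes with exactly the first t picks
set_option maxRecDepth 8192 in
lemma outerB_spec (f : Nat) : ∀ (n t m p : Int) (j c : Nat) (taken : List Char),
    2 ≤ n → 0 ≤ m → 1 ≤ p → 0 < t →
    p - 1 + (t - 1) * m < ((pvCat n).length : Int) →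
    f + j = 1001 →
    (c : Int) ≤ t →
    taken = (List.range c).map (pvPick n p m) →
    ((c : Int) < t → ((pvPre n j).length : Int) ≤ p - 1 + (c : Int) * m) →
    outerB f n t m (j : Int) ((pvPre n j).length : Int) (p - 1 + (c : Int) * m) taken
      = (List.range t.toNat).map (pvPick n p m) := by
  induction f with
  | zero =>
    intro n t m p j c taken h2 hm hp ht hbig hfj hct htaken hinv
    have hj : j = 1001 := by omega
    subst hj
    by_cases hc : (c : Int) < t
    · exfalso
      have h1 := hinv hc
      have hpre : pvPre n 1001 = pvCat n := rfl
      have hmul : (c : Int) * m ≤ (t - 1) * m :=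
        mul_le_mul_of_nonneg_right (by omega) hm
      rw [hpre] at h1
      linarith
    · have hceq : c = t.toNat := by omega
      subst hceq
      simpa [outerB] using htaken
  | succ f ih =>
    intro n t m p j c taken h2 hm hp ht hbig hfj hct htaken hinv
    have hlen : taken.length = c := by subst htaken; simp
    by_cases hc : (c : Int) < t
    · have hj : j ≤ 1000 := by omega
      have hcond : ((taken.length : Int) < t ∧ (j : Int) ≤ 1000) :=
        ⟨by rw [hlen]; exact hc, by omega⟩
      have hrep : convB 1001 n (j : Int) [] = pvBlk n j :=
        (conv_eq 1001 n (j : Int) [] h2 (by positivity) (by omega)).symm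
      have htarget : ((pvPre n j).length : Int) ≤ p - 1 + (c : Int) * m := hinv hc
      obtain ⟨d, heq, hbnd, hexit, hle⟩ :=
        takeB_spec t.toNat t (pvBlk n j) ((pvPre n j).length : Int) (p - 1 + (c : Int) * m) m taken hm htarget
      simp only [outerB, if_pos hcond, hrep, heq]
      have hcd_le : ((c : Int) + d) ≤ t := by
        rcases hle with h | h
        · rw [hlen] at h; exact_mod_cast h
        · subst h; push_cast; omega
      have hexit2 : ((c : Int) + d ≥ t) ∨ ((pvPre n j).length : Int) + ((pvBlk n j).length : Int) ≤ (p - 1 + (c : Int) * m) + (d : Int) * m := by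
        rcases hexit with h | h | h
        · left; rw [hlen] at h; exact_mod_cast h
        · right; exact h
        · subst h; left; push_cast; omega
      have e1 : (j : Int) + 1 = ((j + 1 : Nat) : Int) := by push_cast; ring
      have e2 : ((pvPre n j).length : Int) + ((pvBlk n j).length : Int) = ((pvPre n (j + 1)).length : Int) := by
        rw [pre_succ]; push_cast [List.length_append]; ring
      have e3 : (p - 1 + (c : Int) * m) + (d : Int) * m = p - 1 + ((c + d : Nat) : Int) * m := by
        push_cast; ring
      have e4 : taken ++ (List.range d).map
            (fun (k : Nat) => (PySem.List.pyGet? (pvBlk n j) ((p - 1 + (c : Int) * m) + (k : Int) * m - ((pvPre n j).length : Int))).getD ' ')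
          = (List.range (c + d)).map (pvPick n p m) := by
        subst htaken
        rw [List.range_add, List.map_append, List.map_map]
        congr 1
        apply List.map_congr_left
        intro k hk
        have hk' : k < d := by simpa using hk
        have hidx : p - 1 + ((c + k : Nat) : Int) * m = (p - 1 + (c : Int) * m) + (k : Int) * m := by
          push_cast; ring
        have hkm : (0 : Int) ≤ (k : Int) * m := mul_nonneg (by positivity) hm
        have hup := hbnd k hk'
        simp only [Function.comp_def, pvPick]
        rw [cat_split n j hj, pyGet?_middle _ _ _ _ (by rw [hidx]; linarith) (by rw [hidx]; push_cast at hup ⊢; linarith)]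
        congr 2
        rw [hidx]
      rw [e1, e2, e3, e4]
      exact ih n t m p (j + 1) (c + d) _ h2 hm hp ht hbig (by omega) (by exact_mod_cast hcd_le) rfl
        (by intro hlt
            rcases hexit2 with h | h
            · exfalso; push_cast at hlt; omega
            · rw [← e2, ← e3]; exact h)
    · have hceq : c = t.toNat := by omega
      have hcnd : ¬ ((taken.length : Int) < t ∧ (j : Int) ≤ 1000) := by
        rw [hlen]; push_cast; omega
      simp only [outerB, if_neg hcnd]
      rw [htaken, hceq]

-- the outer loop is the identity once t picks (or a non-positive t) are reached
lemma outerB_stop (f : Nat) (n t m num pos target : Int) (taken : List Char)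
    (h : ¬ ((taken.length : Int) < t)) : outerB f n t m num pos target taken = taken := by
  cases f with
  | zero => rfl
  | succ f =>
    simp only [outerB]
    rw [if_neg (by tauto)]

-- ===== VERDICT (by name: the statement is the Claim_ definition above) =====
set_option maxRecDepth 8192 in
theorem game_of_n_spec : Claim_equal_game_of_n := by
  intro n t m p _ hpre
  obtain ⟨h2, h16, hrest⟩ := hpre
  unfold Spec_game_of_n
  show game_of_n n t m p = game_of_n_alt n t m p
  by_cases ht0 : t ≤ 0
  · -- both produce the empty string: A's loop has fuel 0, B's loop stops at once
    have htn : t.toNat = 0 := by omega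
    rw [game_of_n, game_of_n_alt, htn,
      outerB_stop 1001 n t m 0 0 (p - 1) [] (by simp; omega)]
    rfl
  · obtain ⟨hp, hm, hbound⟩ : 1 ≤ p ∧ 0 ≤ m ∧ p - 1 + (t - 1) * m < pvLen n := by
      rcases hrest with h | h
      · omega
      · exact h
    have ht : 0 < t := by omega
    have hbig : p - 1 + (t - 1) * m < ((pvCat n).length : Int) := by
      rw [cat_len n h2]; exact hbound
    -- A's side
    have hA : game_of_n n t m p = String.ofList ((List.range t.toNat).map (pvPick n p m)) := by
      rw [game_of_n]
      simp only [cat_eq]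
      rw [pickA_spec t.toNat (pvCat n) (p - 1) m [] (by
        intro k hk
        have hk1 : (k : Int) ≤ t - 1 := by omega
        have hkm : (k : Int) * m ≤ (t - 1) * m := mul_le_mul_of_nonneg_right hk1 hm
        have hkm0 : (0 : Int) ≤ (k : Int) * m := mul_nonneg (Int.natCast_nonneg k) hm
        constructor
        · omega
        · linarith)]
      rfl
    -- B's side
    have hB : game_of_n_alt n t m p = String.ofList ((List.range t.toNat).map (pvPick n p m)) := by
      rw [game_of_n_alt]
      have h0 : outerB 1001 n t m 0 0 (p - 1) []
          = outerB 1001 n t m ((0 : Nat) : Int) ((pvPre n 0).length : Int) (p - 1 + ((0 : Nat) : Int) * m) [] := by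
        norm_num [pvPre]
      rw [h0, outerB_spec 1001 n t m p 0 0 [] h2 hm hp ht hbig (by omega) (by omega) (by simp)
        (by intro _; simp [pvPre]; omega)]
    rw [hA, hB]
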